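-- pv_equiv track=rewrite | github.com/ausaki/data_structures_and_algorithms | leetcode/string-without-aaa-or-bbb/401860408.py | strWithout3a3b
-- ===== SOURCE A (Python) =====
-- def strWithout3a3b(A: int, B: int) -> str:
--     a, b = 'a', 'b'
--     if B > A:
--         A, B = B, A
--         a, b = b, a
--     result = ''
--     while A and B:
--         if A > B:
--             result += a * 2 + b
--             A -= 2
--         else:
--             result += a + b
--             A -= 1
--         B -= 1
--     if A:
--         result += a * A
--     return result
-- ===== SOURCE B (Python) =====
-- def strWithout3a3b(A: int, B: int) -> str:
--     if B > A:
--         maj, mn, ma, mb = B, A, 'b', 'a'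
--     else:
--         maj, mn, ma, mb = A, B, 'a', 'b'
--     if maj <= 2 * mn:
--         return (2 * ma + mb) * (maj - mn) + (ma + mb) * (2 * mn - maj)
--     return (2 * ma + mb) * mn + ma * (maj - 2 * mn)
-- ===== Notes on version B (the rewrite author's own statement) =====
-- stated objective: simpler
-- what changed: Replaces the character-by-character while loop with a closed-form arithmetic split: after normalizing to (majority, minority) counts, the answer is a few string multiplications ('aab'/'ab'/'a' blocks) computed directly from the counts.
-- outside the precondition, e.g. on strWithout3a3b(2, -1): A returns 'aab', B returns 'aaaa'; on strWithout3a3b(-1, 0): A returns '', B returns 'bb'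
import Mathlib
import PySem

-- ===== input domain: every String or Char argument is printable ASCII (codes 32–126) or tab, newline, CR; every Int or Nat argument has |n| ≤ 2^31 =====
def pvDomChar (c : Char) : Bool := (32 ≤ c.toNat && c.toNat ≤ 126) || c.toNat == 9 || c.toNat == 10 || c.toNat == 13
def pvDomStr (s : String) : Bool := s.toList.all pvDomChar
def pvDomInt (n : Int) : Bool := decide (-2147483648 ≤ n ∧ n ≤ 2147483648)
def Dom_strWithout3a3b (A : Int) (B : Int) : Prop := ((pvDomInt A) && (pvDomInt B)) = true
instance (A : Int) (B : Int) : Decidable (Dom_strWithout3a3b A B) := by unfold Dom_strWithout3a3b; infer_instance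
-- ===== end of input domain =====

-- B replaces A's character-by-character while loop by a closed-form split of the counts
-- into 'aab'/'ab'/'a' blocks computed with string multiplication (objective: simpler).

-- Python's  s * n  on strings (empty for n ≤ 0), over List Char (shared primitive of both ports)
def pyMul (s : List Char) (n : Int) : List Char := (List.replicate n.toNat s).flatten

-- ===== PORT A =====
-- the while loop; fuel = A.toNat + B.toNat bounds the iteration count (termination only)
def strA_loop : Nat → Int → Int → List Char → List Char → List Char → List Char
  | 0, A, _, a, _, result => if A ≠ 0 then result ++ pyMul a A else result
  | Nat.succ f, A, B, a, b, result =>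
    if A ≠ 0 ∧ B ≠ 0 then
      if A > B then strA_loop f (A - 2) (B - 1) a b (result ++ (pyMul a 2 ++ b))
      else strA_loop f (A - 1) (B - 1) a b (result ++ (a ++ b))
    else if A ≠ 0 then result ++ pyMul a A else result

def strWithout3a3b (A : Int) (B : Int) : String :=
  if B > A then String.ofList (strA_loop (B.toNat + A.toNat) B A ['b'] ['a'] [])
  else String.ofList (strA_loop (A.toNat + B.toNat) A B ['a'] ['b'] [])

-- ===== PORT B =====
def altCore (maj mn : Int) (ma mb : List Char) : List Char :=
  if maj ≤ 2 * mn then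
    pyMul (pyMul ma 2 ++ mb) (maj - mn) ++ pyMul (ma ++ mb) (2 * mn - maj)
  else
    pyMul (pyMul ma 2 ++ mb) mn ++ pyMul ma (maj - 2 * mn)

def strWithout3a3b_alt (A : Int) (B : Int) : String :=
  if B > A then String.ofList (altCore B A ['b'] ['a'])
  else String.ofList (altCore A B ['a'] ['b'])

-- ===== PRECONDITION & SPEC =====
-- Pre_ excludes negative counts (outside the problem's natural domain): there A's while
-- loop either diverges (e.g. A = -1, B = -2) or returns accidental leftover-state values.
def Pre_strWithout3a3b (A : Int) (B : Int) : Prop := 0 ≤ A ∧ 0 ≤ B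
instance (A : Int) (B : Int) : Decidable (Pre_strWithout3a3b A B) := by unfold Pre_strWithout3a3b; infer_instance

def pvWitness_strWithout3a3b : Int × Int := (3, 2)

def Spec_strWithout3a3b (A : Int) (B : Int) (out : String) : Prop := out = strWithout3a3b_alt A B
instance (A : Int) (B : Int) (out : String) : Decidable (Spec_strWithout3a3b A B out) := by unfold Spec_strWithout3a3b; infer_instance

-- ===== CLAIM (what is proved, stated in full; the proofs are below) =====
def Claim_equal_strWithout3a3b : Prop := ∀ (A : Int) (B : Int), Dom_strWithout3a3b A B → Pre_strWithout3a3b A B → Spec_strWithout3a3b A B (strWithout3a3b A B)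

-- ===== LEMMAS AND PROOFS =====

lemma pyMul_nonpos (s : List Char) {n : Int} (h : n ≤ 0) : pyMul s n = [] := by
  have h0 : n.toNat = 0 := by omega
  unfold pyMul
  rw [h0]
  rfl

lemma pyMul_succ (s : List Char) {n : Int} (h : 0 < n) : pyMul s n = s ++ pyMul s (n - 1) := by
  have h1 : n.toNat = (n - 1).toNat + 1 := by omega
  unfold pyMul
  rw [h1, List.replicate_succ, List.flatten_cons]

-- closed-form block peeled when the loop takes the 'aab' branch
lemma altCore_step_gt (maj mn : Int) (ma mb : List Char) (h1 : 1 ≤ mn) (h2 : mn < maj) :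
    altCore maj mn ma mb = (pyMul ma 2 ++ mb) ++ altCore (maj - 2) (mn - 1) ma mb := by
  unfold altCore
  by_cases hle : maj ≤ 2 * mn
  · rw [if_pos hle, if_pos (by omega : maj - 2 ≤ 2 * (mn - 1))]
    rw [pyMul_succ _ (by omega : (0:Int) < maj - mn)]
    have e1 : maj - mn - 1 = (maj - 2) - (mn - 1) := by ring
    have e2 : 2 * mn - maj = 2 * (mn - 1) - (maj - 2) := by ring
    rw [e1, e2, List.append_assoc]
  · rw [if_neg hle, if_neg (by omega : ¬ (maj - 2 ≤ 2 * (mn - 1)))]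
    rw [pyMul_succ _ (by omega : (0:Int) < mn)]
    have e : maj - 2 * mn = (maj - 2) - 2 * (mn - 1) := by ring
    rw [e, List.append_assoc]

-- closed-form block peeled when the loop takes the 'ab' branch (maj = mn)
lemma altCore_step_eq (mn : Int) (ma mb : List Char) (h1 : 1 ≤ mn) :
    altCore mn mn ma mb = (ma ++ mb) ++ altCore (mn - 1) (mn - 1) ma mb := by
  unfold altCore
  rw [if_pos (by omega : mn ≤ 2 * mn), if_pos (by omega : mn - 1 ≤ 2 * (mn - 1))]
  simp only [sub_self]
  rw [pyMul_nonpos _ (le_refl 0), pyMul_succ _ (by omega : (0:Int) < 2 * mn - mn)]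
  have e : 2 * mn - mn - 1 = 2 * (mn - 1) - (mn - 1) := by ring
  rw [e]
  simp [List.append_assoc]

-- closed form when the loop has exited (mn = 0)
lemma altCore_exit (maj : Int) (ma mb : List Char) (h : 0 ≤ maj) :
    altCore maj 0 ma mb = if maj ≠ 0 then pyMul ma maj else [] := by
  unfold altCore
  by_cases hz : maj = 0
  · subst hz; simp [pyMul_nonpos]
  · rw [if_neg (by omega : ¬ maj ≤ 2 * 0), if_pos hz, pyMul_nonpos _ (le_refl (0:Int))]
    norm_num

-- loop invariant: with enough fuel and 0 ≤ mn ≤ maj, the loop appends the closed form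
lemma loop_eq (fuel : Nat) : ∀ (maj mn : Int) (ma mb res : List Char),
    0 ≤ mn → mn ≤ maj → mn.toNat ≤ fuel →
    strA_loop fuel maj mn ma mb res = res ++ altCore maj mn ma mb := by
  induction fuel with
  | zero =>
    intro maj mn ma mb res h0 h1 hf
    have hmn : mn = 0 := by omega
    subst hmn
    rw [strA_loop, altCore_exit maj ma mb (by omega)]
    split_ifs <;> simp
  | succ f ih =>
    intro maj mn ma mb res h0 h1 hf
    by_cases hmn : mn = 0
    · subst hmn
      rw [strA_loop, altCore_exit maj ma mb (by omega)]
      rw [if_neg (by omega : ¬ (maj ≠ 0 ∧ (0:Int) ≠ 0))]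
      split_ifs <;> simp
    · have hpos : 1 ≤ mn := by omega
      rw [strA_loop, if_pos ⟨by omega, hmn⟩]
      by_cases hgt : maj > mn
      · rw [if_pos hgt, ih (maj - 2) (mn - 1) ma mb _ (by omega) (by omega) (by omega)]
        rw [altCore_step_gt maj mn ma mb hpos hgt]
        simp [List.append_assoc]
      · rw [if_neg hgt]
        have heq : maj = mn := by omega
        subst heq
        rw [ih (maj - 1) (maj - 1) ma mb _ (by omega) (by omega) (by omega)]
        rw [altCore_step_eq maj ma mb hpos]
        simp [List.append_assoc]

-- ===== VERDICT (by name: the statement is the Claim_ definition above) =====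
theorem strWithout3a3b_spec : Claim_equal_strWithout3a3b := by
  intro A B _ hPre
  obtain ⟨hA, hB⟩ := hPre
  unfold Spec_strWithout3a3b strWithout3a3b strWithout3a3b_alt
  by_cases h : B > A
  · rw [if_pos h, if_pos h,
      loop_eq (B.toNat + A.toNat) B A ['b'] ['a'] [] hA (by omega) (by omega)]
    simp
  · rw [if_neg h, if_neg h,
      loop_eq (A.toNat + B.toNat) A B ['a'] ['b'] [] hB (by omega) (by omega)]
    simp
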